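-- pv_equiv track=rewrite | github.com/Sangamsonu/100_days_of_code | Check String - GFG/check-string.py | check
-- ===== SOURCE A (Python) =====
-- def check (s):
--     # your code here
--     if len(s) <= 1:
--         return True
--
--     first = s[0]
--     for i in s[1:]:
--         if i != first:
--             return False
--     return True;
-- ===== SOURCE B (Python) =====
-- def check(s):
--     # distinct characters: at most one kind => all identical
--     return len(set(s)) <= 1
-- ===== Notes on version B (the rewrite author's own statement) =====
-- stated objective: idiomatic
-- what changed: Replaces the early-exit scan against the first character by building the set of distinct characters and testing len(set(s)) <= 1.
import Mathlib
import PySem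

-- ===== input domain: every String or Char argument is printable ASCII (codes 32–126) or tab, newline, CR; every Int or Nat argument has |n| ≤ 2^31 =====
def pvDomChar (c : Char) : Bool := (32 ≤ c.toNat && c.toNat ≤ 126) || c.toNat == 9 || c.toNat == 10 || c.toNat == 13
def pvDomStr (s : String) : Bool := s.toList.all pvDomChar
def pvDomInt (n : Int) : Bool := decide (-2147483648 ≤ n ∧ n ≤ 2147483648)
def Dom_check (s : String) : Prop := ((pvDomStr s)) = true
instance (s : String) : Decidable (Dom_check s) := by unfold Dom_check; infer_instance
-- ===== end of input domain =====

-- B is the idiomatic set formulation: len(set(s)) <= 1; A scans with an early exit.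

-- ===== PORT A =====
-- the 'for i in s[1:]' loop with early return False
def checkLoop (first : Char) : List Char → Bool
  | [] => true
  | i :: rest => if i != first then false else checkLoop first rest

def check (s : String) : Bool :=
  if PySem.Chars.len s.toList ≤ 1 then true
  else
    match PySem.Chars.pyGet? s.toList 0 with
    | none => true  -- unreachable: length > 1
    | some first => checkLoop first (PySem.Chars.slice s.toList (some 1) none)

-- ===== PORT B =====
def check_alt (s : String) : Bool :=
  decide ((PySem.Set.ofList s.toList).length ≤ 1)

-- ===== PRECONDITION & SPEC =====
def Spec_check (s : String) (out : Bool) : Prop := out = check_alt s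
instance (s : String) (out : Bool) : Decidable (Spec_check s out) := by unfold Spec_check; infer_instance

-- ===== CLAIM (what is proved, stated in full; the proofs are below) =====
def Claim_equal_check : Prop := ∀ (s : String), Dom_check s → Spec_check s (check s)

-- ===== LEMMAS AND PROOFS =====

theorem checkLoop_eq_all (first : Char) (l : List Char) :
    checkLoop first l = l.all (· == first) := by
  induction l with
  | nil => rfl
  | cons x xs ih =>
      simp only [checkLoop, List.all_cons, ih, bne]
      cases h : x == first <;> simp

theorem length_le_foldl_add (l : List Char) (s : PySem.Set Char) :
    s.length ≤ (l.foldl PySem.Set.add s).length := by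
  induction l generalizing s with
  | nil => simp
  | cons x xs ih =>
      refine le_trans ?_ (ih (PySem.Set.add s x))
      simp only [PySem.Set.add]
      split <;> simp

theorem foldl_add_singleton (first : Char) (l : List Char) :
    ((l.foldl PySem.Set.add [first]).length ≤ 1) ↔ (l.all (· == first) = true) := by
  induction l with
  | nil => simp
  | cons x xs ih =>
      simp only [List.foldl_cons, List.all_cons, Bool.and_eq_true]
      by_cases hx : x = first
      · subst hx
        have : PySem.Set.add [x] x = [x] := by simp [PySem.Set.add, PySem.Set.contains]
        rw [this]
        simp [ih]
      · have hadd : PySem.Set.add [first] x = [first, x] := by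
          simp [PySem.Set.add, PySem.Set.contains]
          intro h; exact hx h
        rw [hadd]
        have h2 : 2 ≤ (xs.foldl PySem.Set.add [first, x]).length :=
          length_le_foldl_add xs [first, x]
        constructor
        · omega
        · rintro ⟨hxf, _⟩
          exact absurd (eq_of_beq hxf) hx

theorem ofList_cons_length (first : Char) (l : List Char) :
    (PySem.Set.ofList (first :: l)).length = (l.foldl PySem.Set.add [first]).length := by
  rw [PySem.Set.ofList_eq_foldl]
  simp [PySem.Set.add, PySem.Set.contains]

-- ===== VERDICT (by name: the statement is the Claim_ definition above) =====
theorem check_spec : Claim_equal_check := by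
  intro s _
  show check s = check_alt s
  unfold check check_alt
  cases h : s.toList with
  | nil => simp [PySem.Chars.len_eq, PySem.Set.ofList]
  | cons first rest =>
      simp only [PySem.Chars.len_eq, PySem.Chars.pyGet?_eq_listPyGet?,
        PySem.Chars.slice_eq_listSlice, PySem.List.slice_from_one,
        PySem.List.pyGet?_zero_cons, List.length_cons, List.tail_cons]
      by_cases hr : rest = []
      · subst hr
        simp [PySem.Set.ofList, PySem.Set.add, PySem.Set.contains]
      · have hlen : ¬ ((rest.length + 1 : Int) ≤ 1) := by
          have := List.length_pos_iff.mpr hr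
          omega
        rw [if_neg (by exact_mod_cast hlen)]
        rw [checkLoop_eq_all, ofList_cons_length]
        by_cases hle : (rest.foldl PySem.Set.add [first]).length ≤ 1
        · simp [hle, (foldl_add_singleton first rest).mp hle]
        · have hall : rest.all (· == first) = false := by
            cases h' : rest.all (· == first)
            · rfl
            · exact absurd ((foldl_add_singleton first rest).mpr h') hle
          simp [hle, hall]
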